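-- pv_equiv track=rewrite | github.com/TarunRamkumar/CSCE240 | prog3-ui/src/FileParser.py | groupTOC
-- ===== SOURCE A (Python) =====
-- def groupTOC(currentTOC):
--     groupedTOC = {"Part 0":[]}
--     currentPart = ""
--     for item in currentTOC:
--         if "PART" in item:
--             currentPart = item
--             groupedTOC[currentPart] = []
--         else:
--             if currentPart:
--                 groupedTOC[currentPart].append(item)
--             else:
--                 groupedTOC["Part 0"].append(item)
--     return groupedTOC
-- ===== SOURCE B (Python) =====
-- def groupTOC(currentTOC):
--     # Decomposition by chunking: split the list at PART headers and assign each
--     # whole chunk at once, instead of dispatching item-by-item into an accumulator.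
--     items = list(currentTOC)
--
--     def span(xs):
--         """(items before the first PART header, rest starting at that header)."""
--         for j, x in enumerate(xs):
--             if "PART" in x:
--                 return xs[:j], xs[j:]
--         return xs, []
--
--     pre, rest = span(items)
--     result = {"Part 0": pre}
--     while rest:
--         header, rest = rest[0], rest[1:]
--         chunk, rest = span(rest)
--         result[header] = chunk
--     return result
-- ===== Notes on version B (the rewrite author's own statement) =====
-- stated objective: alternative
-- what changed: Replaces A's item-by-item accumulator loop (tracking the current part and appending each item into the dict) by a chunking decomposition: span off the prefix before the first PART header, then repeatedly take a header and assign its whole following chunk at once.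
import Mathlib
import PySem

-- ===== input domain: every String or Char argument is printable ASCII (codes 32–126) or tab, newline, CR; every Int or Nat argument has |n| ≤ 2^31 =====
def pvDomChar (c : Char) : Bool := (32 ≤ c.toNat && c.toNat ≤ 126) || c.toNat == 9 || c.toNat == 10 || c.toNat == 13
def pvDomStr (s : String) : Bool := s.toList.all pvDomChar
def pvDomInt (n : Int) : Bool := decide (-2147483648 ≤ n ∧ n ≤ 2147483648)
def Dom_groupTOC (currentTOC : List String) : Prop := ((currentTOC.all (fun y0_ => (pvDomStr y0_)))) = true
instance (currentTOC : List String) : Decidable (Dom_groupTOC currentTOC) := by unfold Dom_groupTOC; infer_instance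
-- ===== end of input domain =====

-- B replaces A's item-by-item accumulator dispatch by splitting the list into
-- header-delimited chunks and assigning each whole chunk at once (objective: alternative decomposition).

-- ===== PORT A =====
-- the loop body of A's for-loop: state = (groupedTOC, currentPart)
def pvStepA (st : PySem.Dict String (List String) × String) (item : String) :
    PySem.Dict String (List String) × String :=
  if PySem.Str.isIn "PART" item then
    (st.1.insert item [], item)
  else
    if st.2 ≠ "" then
      (st.1.modify st.2 [] (· ++ [item]), st.2)
    else
      (st.1.modify "Part 0" [] (· ++ [item]), st.2)

def groupTOC (currentTOC : List String) : List (String × List String) :=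
  (currentTOC.foldl pvStepA (PySem.Dict.ofList [("Part 0", [])], "")).1.items

-- ===== PORT B =====
-- Source B's span(xs): (items before the first PART header, rest starting at that header)
def pvSpan (xs : List String) : List String × List String :=
  match xs with
  | [] => ([], [])
  | x :: t =>
      if PySem.Str.isIn "PART" x then ([], x :: t)
      else
        let r := pvSpan t
        (x :: r.1, r.2)

-- (used by pvBuild's termination proof)
theorem pvSpan_snd_length (xs : List String) : (pvSpan xs).2.length ≤ xs.length := by
  induction xs with
  | nil => simp [pvSpan]
  | cons x t ih =>
      simp only [pvSpan]
      split
      · simp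
      · simpa using Nat.le_succ_of_le ih

-- Source B's while loop: consume a header, span off its chunk, assign, repeat
def pvBuild (rest : List String) (d : PySem.Dict String (List String)) :
    PySem.Dict String (List String) :=
  match rest with
  | [] => d
  | h :: t => pvBuild (pvSpan t).2 (d.insert h (pvSpan t).1)
termination_by rest.length
decreasing_by exact Nat.lt_succ_of_le (pvSpan_snd_length t)

def groupTOC_alt (currentTOC : List String) : List (String × List String) :=
  let s := pvSpan currentTOC
  (pvBuild s.2 (PySem.Dict.ofList [("Part 0", s.1)])).items

-- ===== PRECONDITION & SPEC =====
def Spec_groupTOC (currentTOC : List String) (out : List (String × List String)) : Prop := out = groupTOC_alt currentTOC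
instance (currentTOC : List String) (out : List (String × List String)) : Decidable (Spec_groupTOC currentTOC out) := by unfold Spec_groupTOC; infer_instance

-- ===== CLAIM (what is proved, stated in full; the proofs are below) =====
def Claim_equal_groupTOC : Prop := ∀ (currentTOC : List String), Dom_groupTOC currentTOC → Spec_groupTOC currentTOC (groupTOC currentTOC)

-- ===== LEMMAS AND PROOFS =====

-- the non-header predicate Source B's span consumes
def pvNH (x : String) : Bool := !PySem.Str.isIn "PART" x

theorem pvStepA_nonheader (d : PySem.Dict String (List String)) (cur x : String)
    (hx : PySem.Chars.isIn ['P','A','R','T'] x.toList = false) :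
    pvStepA (d, cur) x = (d.modify (if cur = "" then "Part 0" else cur) [] (· ++ [x]), cur) := by
  by_cases hc : cur = "" <;> simp [pvStepA, PySem.Str.isIn, hx, hc]

theorem pvSpan_eq (xs : List String) :
    pvSpan xs = (xs.takeWhile pvNH, xs.dropWhile pvNH) := by
  induction xs with
  | nil => simp [pvSpan]
  | cons x t ih =>
      by_cases hx : PySem.Chars.isIn ['P','A','R','T'] x.toList = true
      · simp [pvSpan, PySem.Str.isIn, hx, pvNH]
      · simp [pvSpan, PySem.Str.isIn, hx, pvNH, ih]

theorem pvHeader_ne_empty (h : String) (hh : PySem.Str.isIn "PART" h = true) : h ≠ "" := by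
  intro he
  rw [PySem.Str.isIn_iff_infix] at hh
  have := hh.sublist.length_le
  simp [he] at this

theorem pvModify_insert_append (d : PySem.Dict String (List String)) (k : String)
    (v : List String) (x : String) :
    (d.insert k v).modify k [] (· ++ [x]) = d.insert k (v ++ [x]) := by
  simp [PySem.Dict.modify, PySem.Dict.getD_insert_self, PySem.Dict.insert_insert_self]

theorem pvAppendLoop (pre : List String) (d : PySem.Dict String (List String))
    (k : String) (v : List String) :
    pre.foldl (fun d x => d.modify k [] (· ++ [x])) (d.insert k v) = d.insert k (v ++ pre) := by
  induction pre generalizing v with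
  | nil => simp
  | cons x pre ih =>
      simp only [List.foldl_cons, pvModify_insert_append]
      rw [ih]
      simp

theorem pvPrefixPhase (pre : List String) (hpre : ∀ x ∈ pre, PySem.Str.isIn "PART" x = false)
    (rest : List String) (d : PySem.Dict String (List String)) (cur : String) :
    (pre ++ rest).foldl pvStepA (d, cur)
      = rest.foldl pvStepA
          (pre.foldl (fun d x => d.modify (if cur = "" then "Part 0" else cur) [] (· ++ [x])) d, cur) := by
  induction pre generalizing d with
  | nil => simp
  | cons x pre ih =>
      have hx : PySem.Chars.isIn ['P','A','R','T'] x.toList = false := by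
        simpa [PySem.Str.isIn] using hpre x (by simp)
      have hpre' : ∀ y ∈ pre, PySem.Str.isIn "PART" y = false := fun y hy => hpre y (by simp [hy])
      simp only [List.cons_append, List.foldl_cons, pvStepA_nonheader _ _ _ hx]
      exact ih hpre' _

theorem pvHeaderPhase (n : Nat) (rest : List String) (hn : rest.length ≤ n)
    (hhd : ∀ h, rest.head? = some h → PySem.Str.isIn "PART" h = true)
    (d : PySem.Dict String (List String)) (cur : String) :
    (rest.foldl pvStepA (d, cur)).1 = pvBuild rest d := by
  induction n generalizing rest d cur with
  | zero =>
      have : rest = [] := List.length_eq_zero_iff.mp (Nat.le_zero.mp hn)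
      simp [this, pvBuild]
  | succ n ih =>
      match rest with
      | [] => simp [pvBuild]
      | h :: t =>
          have hh : PySem.Str.isIn "PART" h = true := hhd h rfl
          have hne : h ≠ "" := pvHeader_ne_empty h hh
          have hsplit : t.takeWhile pvNH ++ t.dropWhile pvNH = t := List.takeWhile_append_dropWhile
          have hh' : PySem.Chars.isIn ['P','A','R','T'] h.toList = true := by
            simpa [PySem.Str.isIn] using hh
          have hstep : (h :: t).foldl pvStepA (d, cur) = t.foldl pvStepA (d.insert h [], h) := by
            simp [pvStepA, PySem.Str.isIn, hh']
          rw [hstep]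
          conv_lhs => rw [← hsplit]
          rw [pvPrefixPhase (t.takeWhile pvNH)
                (fun x hx => by simpa [pvNH] using List.mem_takeWhile_imp hx)
                (t.dropWhile pvNH) (d.insert h []) h]
          simp only [if_neg hne]
          rw [pvAppendLoop]
          have hlen : (t.dropWhile pvNH).length ≤ n := by
            have := List.length_dropWhile_le pvNH t
            simp only [List.length_cons] at hn
            omega
          have hhd' : ∀ h', (t.dropWhile pvNH).head? = some h' → PySem.Str.isIn "PART" h' = true := by
            intro h' hh'
            have hne' : t.dropWhile pvNH ≠ [] := by
              intro hE; rw [hE] at hh'; simp at hh'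
            have := List.head_dropWhile_not pvNH hne'
            rw [List.head?_eq_some_head hne'] at hh'
            simp only [Option.some.injEq] at hh'
            rw [hh'] at this
            simpa [pvNH] using this
          rw [ih (t.dropWhile pvNH) hlen hhd' (d.insert h ([] ++ t.takeWhile pvNH)) h]
          simp only [pvBuild, pvSpan_eq, List.nil_append]

-- ===== VERDICT (by name: the statement is the Claim_ definition above) =====
theorem groupTOC_spec : Claim_equal_groupTOC := by
  intro xs _
  unfold Spec_groupTOC groupTOC groupTOC_alt
  have hsplit : xs.takeWhile pvNH ++ xs.dropWhile pvNH = xs := List.takeWhile_append_dropWhile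
  conv_lhs => rw [← hsplit]
  rw [pvPrefixPhase (xs.takeWhile pvNH)
        (fun x hx => by simpa [pvNH] using List.mem_takeWhile_imp hx)
        (xs.dropWhile pvNH) (PySem.Dict.ofList [("Part 0", [])]) ""]
  simp only [reduceIte]
  have hinit : (PySem.Dict.ofList [("Part 0", ([] : List String))])
      = (PySem.Dict.ofList ([] : List (String × List String))).insert "Part 0" [] := rfl
  rw [hinit, pvAppendLoop]
  have hhd : ∀ h, (xs.dropWhile pvNH).head? = some h → PySem.Str.isIn "PART" h = true := by
    intro h hh
    have hne : xs.dropWhile pvNH ≠ [] := by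
      intro hE; rw [hE] at hh; simp at hh
    have := List.head_dropWhile_not pvNH hne
    rw [List.head?_eq_some_head hne] at hh
    simp only [Option.some.injEq] at hh
    rw [hh] at this
    simpa [pvNH] using this
  rw [pvHeaderPhase (xs.dropWhile pvNH).length _ le_rfl hhd]
  simp [pvSpan_eq]
  rfl
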